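-- pv_equiv track=rewrite | github.com/ryanlcason2010-pixel/BotConChatv1.1 | framework-assistant/components/framework_index_clean.py | get_framework_navigation
-- ===== SOURCE A (Python) =====
-- from typing import List, Dict, Any, Optional, Tuple
--
-- def get_framework_navigation(
--     current_id: int,
--     all_frameworks: List[Dict[str, Any]]
-- ) -> Tuple[Optional[int], Optional[int]]:
--     """
--     Get previous and next framework IDs for navigation.
--
--     Args:
--         current_id: Current framework ID
--         all_frameworks: List of all frameworks (sorted)
--
--     Returns:
--         Tuple of (previous_id, next_id), None if at boundaries
--     """
--     # Find current index
--     current_idx = None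
--     for i, fw in enumerate(all_frameworks):
--         if fw.get('id') == current_id:
--             current_idx = i
--             break
--
--     if current_idx is None:
--         return None, None
--
--     # Get previous and next
--     prev_id = all_frameworks[current_idx - 1].get('id') if current_idx > 0 else None
--     next_id = all_frameworks[current_idx + 1].get('id') if current_idx < len(all_frameworks) - 1 else None
--
--     return prev_id, next_id
-- ===== SOURCE B (Python) =====
-- def get_framework_navigation(current_id, all_frameworks):
--     """Single pass: remember the previous element's id; on the first match,
--     return it together with the id of the element that follows (if any)."""
--     prev_id = None
--     it = iter(all_frameworks)
--     for fw in it: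
--         if fw.get('id') == current_id:
--             for nxt in it:
--                 return prev_id, nxt.get('id')
--             return prev_id, None
--         prev_id = fw.get('id')
--     return None, None
-- ===== Notes on version B (the rewrite author's own statement) =====
-- stated objective: simpler
-- what changed: Replaces the find-index-then-index-back-into-the-list scheme with one streaming pass that carries the previous element's id and, at the first match, reads the successor directly from the iterator, so no indices or length arithmetic are needed.
import Mathlib
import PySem

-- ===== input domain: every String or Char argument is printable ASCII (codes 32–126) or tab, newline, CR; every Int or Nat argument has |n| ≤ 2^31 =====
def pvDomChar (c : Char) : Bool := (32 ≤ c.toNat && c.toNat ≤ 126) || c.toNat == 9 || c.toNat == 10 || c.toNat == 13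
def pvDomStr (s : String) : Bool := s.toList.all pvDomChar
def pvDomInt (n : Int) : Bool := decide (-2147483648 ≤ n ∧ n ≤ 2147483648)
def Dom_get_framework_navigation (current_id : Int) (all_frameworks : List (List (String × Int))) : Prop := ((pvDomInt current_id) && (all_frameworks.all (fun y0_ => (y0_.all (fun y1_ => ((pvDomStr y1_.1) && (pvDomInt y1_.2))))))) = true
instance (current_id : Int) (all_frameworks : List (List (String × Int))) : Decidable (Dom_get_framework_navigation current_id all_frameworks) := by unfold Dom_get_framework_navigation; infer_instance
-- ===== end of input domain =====

-- B replaces A's find-index-then-index-back scheme by one streaming pass that carries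
-- the previous element's id and reads the successor directly after the first match (objective: simpler).

-- ===== PORT A =====
-- the 'for i, fw in enumerate(...)' search for the first matching index
def pvFindIdx (current_id : Int) : Nat → List (List (String × Int)) → Option Nat
  | _, [] => none
  | i, fw :: rest =>
    if (PySem.Dict.mk fw).get? "id" = some current_id then some i
    else pvFindIdx current_id (i + 1) rest

def get_framework_navigation (current_id : Int) (all_frameworks : List (List (String × Int))) : Option Int × Option Int :=
  match pvFindIdx current_id 0 all_frameworks with
  | none => (none, none)
  | some current_idx =>
    -- Python indexes all_frameworks[current_idx ± 1] directly; the guards keep the index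
    -- in range, so pyGet? (= Python indexing) always returns some here; .bind applies .get('id')
    let prev_id : Option Int :=
      if current_idx > 0 then
        (PySem.List.pyGet? all_frameworks ((current_idx : Int) - 1)).bind
          (fun fw => (PySem.Dict.mk fw).get? "id")
      else none
    let next_id : Option Int :=
      if (current_idx : Int) < (all_frameworks.length : Int) - 1 then
        (PySem.List.pyGet? all_frameworks ((current_idx : Int) + 1)).bind
          (fun fw => (PySem.Dict.mk fw).get? "id")
      else none
    (prev_id, next_id)

-- ===== PORT B =====
-- single pass carrying the id of the previously seen element
def pvAltLoop (current_id : Int) (prev_id : Option Int) : List (List (String × Int)) → Option Int × Option Int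
  | [] => (none, none)
  | fw :: rest =>
    if (PySem.Dict.mk fw).get? "id" = some current_id then
      match rest with
      | [] => (prev_id, none)
      | nxt :: _ => (prev_id, (PySem.Dict.mk nxt).get? "id")
    else pvAltLoop current_id ((PySem.Dict.mk fw).get? "id") rest

def get_framework_navigation_alt (current_id : Int) (all_frameworks : List (List (String × Int))) : Option Int × Option Int :=
  pvAltLoop current_id none all_frameworks

-- ===== PRECONDITION & SPEC =====
def Spec_get_framework_navigation (current_id : Int) (all_frameworks : List (List (String × Int))) (out : Option Int × Option Int) : Prop := out = get_framework_navigation_alt current_id all_frameworks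
instance (current_id : Int) (all_frameworks : List (List (String × Int))) (out : Option Int × Option Int) : Decidable (Spec_get_framework_navigation current_id all_frameworks out) := by unfold Spec_get_framework_navigation; infer_instance

-- ===== CLAIM (what is proved, stated in full; the proofs are below) =====
def Claim_equal_get_framework_navigation : Prop := ∀ (current_id : Int) (all_frameworks : List (List (String × Int))), Dom_get_framework_navigation current_id all_frameworks → Spec_get_framework_navigation current_id all_frameworks (get_framework_navigation current_id all_frameworks)

-- ===== LEMMAS AND PROOFS =====
lemma pvFindIdx_shift (cid : Int) (l : List (List (String × Int))) (i : Nat) :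
    pvFindIdx cid i l = (pvFindIdx cid 0 l).map (· + i) := by
  induction l generalizing i with
  | nil => simp [pvFindIdx]
  | cons fw rest ih =>
    by_cases h : (PySem.Dict.mk fw).get? "id" = some cid
    · simp [pvFindIdx, h]
    · simp only [pvFindIdx, if_neg h, ih (i + 1), ih 1, Option.map_map]
      cases pvFindIdx cid 0 rest
      · simp
      · simp; omega

lemma pvAltLoop_spec (cid : Int) (l : List (List (String × Int))) (prev : Option Int) :
    pvAltLoop cid prev l =
      match pvFindIdx cid 0 l with
      | none => (none, none)
      | some j =>
        ((if j = 0 then prev else (l[j-1]?).bind (fun fw => (PySem.Dict.mk fw).get? "id")),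
         (l[j+1]?).bind (fun fw => (PySem.Dict.mk fw).get? "id")) := by
  induction l generalizing prev with
  | nil => simp [pvAltLoop, pvFindIdx]
  | cons fw rest ih =>
    by_cases h : (PySem.Dict.mk fw).get? "id" = some cid
    · simp only [pvAltLoop, pvFindIdx, if_pos h]
      cases rest <;> simp
    · simp only [pvAltLoop, pvFindIdx, if_neg h, ih, pvFindIdx_shift cid rest 1]
      cases hf : pvFindIdx cid 0 rest with
      | none => simp
      | some j =>
        simp only [Option.map_some]
        cases j <;> simp

-- ===== VERDICT (by name: the statement is the Claim_ definition above) =====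
theorem get_framework_navigation_spec : Claim_equal_get_framework_navigation := by
  intro cid l _
  unfold Spec_get_framework_navigation get_framework_navigation get_framework_navigation_alt
  rw [pvAltLoop_spec]
  cases hf : pvFindIdx cid 0 l with
  | none => rfl
  | some j =>
    simp only [Prod.mk.injEq]
    constructor
    · -- prev component
      by_cases hj : j = 0
      · simp [hj]
      · have h1 : ((j : Int) - 1) = ((j - 1 : Nat) : Int) := by omega
        have hp : j > 0 := Nat.pos_of_ne_zero hj
        rw [if_pos hp, if_neg hj, h1, PySem.List.pyGet?_natCast]
    · -- next component
      have h2 : ((j : Int) + 1) = ((j + 1 : Nat) : Int) := by omega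
      by_cases hlt : (j : Int) < (l.length : Int) - 1
      · rw [if_pos hlt, h2, PySem.List.pyGet?_natCast]
      · have hle : l.length ≤ j + 1 := by omega
        rw [if_neg hlt, List.getElem?_eq_none hle]
        rfl
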